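-- pv_equiv track=rewrite | github.com/darko1002001/advent-of-code-23 | code/day_07/part_2.py | make_variations
-- ===== SOURCE A (Python) =====
-- def make_variations(hand: str):
--     if hand == "":
--         return [""]
--     return [
--         x + y
--         for x in ("23456789TQKA" if hand[0] == "J" else hand[0])
--         for y in make_variations(hand[1:])
--     ]
-- ===== SOURCE B (Python) =====
-- import itertools
--
-- def make_variations(hand: str):
--     options = [("23456789TQKA" if c == "J" else c) for c in hand]
--     return ["".join(p) for p in itertools.product(*options)]
-- ===== Notes on version B (the rewrite author's own statement) =====
-- stated objective: idiomatic
-- what changed: Replaces the nested recursion on the string suffix with a per-position option table consumed by itertools.product (rightmost coordinate fastest, matching the recursion's order).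
import Mathlib
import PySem

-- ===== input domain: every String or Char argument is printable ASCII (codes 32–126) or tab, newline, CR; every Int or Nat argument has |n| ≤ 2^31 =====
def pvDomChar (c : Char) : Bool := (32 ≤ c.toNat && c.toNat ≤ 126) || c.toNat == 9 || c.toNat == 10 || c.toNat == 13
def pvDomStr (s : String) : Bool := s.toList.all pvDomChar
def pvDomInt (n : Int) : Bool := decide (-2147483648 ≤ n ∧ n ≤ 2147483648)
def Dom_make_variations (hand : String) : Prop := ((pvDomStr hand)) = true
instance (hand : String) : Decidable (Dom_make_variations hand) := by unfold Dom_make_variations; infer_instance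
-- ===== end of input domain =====

-- B replaces A's suffix recursion by an option table folded into a cartesian product; objective: idiomatic.

-- ===== PORT A =====
-- A's recursion on the string: base case "" -> [""], otherwise flatMap over the
-- choices for the first character, recursing on the suffix. Iterating a Python
-- string yields 1-char strings, so x + y is string concatenation.
def make_variations_go (cs : List Char) : List String :=
  match cs with
  | [] => [""]
  | c :: rest =>
      (if c == 'J' then "23456789TQKA".toList else [c]).flatMap
        (fun x => (make_variations_go rest).map (fun y => String.ofList [x] ++ y))

def make_variations (hand : String) : List String :=
  make_variations_go hand.toList

-- ===== PORT B =====
-- B: per-position option table, then itertools.product (rightmost fastest = foldr),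
-- then ''.join on each tuple of characters.
def make_variations_alt (hand : String) : List String :=
  let options := hand.toList.map (fun c => if c == 'J' then "23456789TQKA".toList else [c])
  (options.foldr (fun opts acc => opts.flatMap (fun c => acc.map (fun p => c :: p))) [[]]).map
    (fun p => String.ofList p)

-- ===== PRECONDITION & SPEC =====
def Spec_make_variations (hand : String) (out : List String) : Prop := out = make_variations_alt hand
instance (hand : String) (out : List String) : Decidable (Spec_make_variations hand out) := by unfold Spec_make_variations; infer_instance

-- ===== CLAIM (what is proved, stated in full; the proofs are below) =====
def Claim_equal_make_variations : Prop := ∀ (hand : String), Dom_make_variations hand → Spec_make_variations hand (make_variations hand)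

-- ===== LEMMAS AND PROOFS =====
theorem mk_append (a b : List Char) : String.ofList a ++ String.ofList b = String.ofList (a ++ b) := by simp

theorem go_eq_prod (cs : List Char) :
    make_variations_go cs =
      ((cs.map (fun c => if c == 'J' then "23456789TQKA".toList else [c])).foldr
        (fun opts acc => opts.flatMap (fun c => acc.map (fun p => c :: p))) [[]]).map
        (fun p => String.ofList p) := by
  induction cs with
  | nil => rfl
  | cons c rest ih =>
      simp only [make_variations_go, ih, List.map_cons, List.foldr_cons,
        List.map_flatMap, List.map_map]
      apply List.flatMap_congr
      intro x _
      simp [Function.comp, mk_append]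

-- ===== VERDICT (by name: the statement is the Claim_ definition above) =====
theorem make_variations_spec : Claim_equal_make_variations := by
  intro hand _
  unfold Spec_make_variations make_variations make_variations_alt
  exact go_eq_prod hand.toList
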